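-- pv_equiv track=rewrite | github.com/Deferf/Summation-Transformer | train_strictish_h2_d4_from_scratch.py | compute_targets
-- ===== SOURCE A (Python) =====
-- from typing import List, Tuple
--
-- def compute_targets(a: int, b: int) -> Tuple[List[int], List[int], List[int], List[int]]:
--     a_digits = [int(ch) for ch in reversed(f"{a:010d}")]
--     b_digits = [int(ch) for ch in reversed(f"{b:010d}")]
--
--     sum_mod_cols: List[int] = []
--     pair_carry_cols: List[int] = []
--     carry_in_cols: List[int] = []
--     y_pairs: List[int] = []
--
--     carry_in = 0
--     for i in range(11):
--         d1 = a_digits[i] if i < 10 else 0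
--         d2 = b_digits[i] if i < 10 else 0
--
--         pair_sum = d1 + d2
--         sum_mod = pair_sum % 10
--         pair_carry = pair_sum // 10
--
--         sum_mod_cols.append(sum_mod)
--         pair_carry_cols.append(pair_carry)
--         carry_in_cols.append(carry_in)
--
--         total = pair_sum + carry_in
--         out_digit = total % 10
--         carry_out = total // 10
--         y_pairs.append(10 * carry_out + out_digit)
--
--         carry_in = carry_out
--
--     return sum_mod_cols, pair_carry_cols, carry_in_cols, y_pairs
-- ===== SOURCE B (Python) =====
-- def compute_targets(a, b):
--     # Column-local arithmetic: every carry comes from a closed form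
--     # (overflow of the low-i-digit sums) instead of a sequential accumulator.
--     la = a % 10 ** 10
--     lb = b % 10 ** 10
--
--     def digit(x, i):
--         return (x // 10 ** i) % 10 if i < 10 else 0
--
--     def carry(i):
--         return (la % 10 ** i + lb % 10 ** i) // 10 ** i
--
--     sum_mod_cols = [(digit(la, i) + digit(lb, i)) % 10 for i in range(11)]
--     pair_carry_cols = [(digit(la, i) + digit(lb, i)) // 10 for i in range(11)]
--     carry_in_cols = [carry(i) for i in range(11)]
--     y_pairs = [10 * carry(i + 1) + (digit(la, i) + digit(lb, i) + carry(i)) % 10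
--                for i in range(11)]
--     return sum_mod_cols, pair_carry_cols, carry_in_cols, y_pairs
-- ===== Notes on version B (the rewrite author's own statement) =====
-- stated objective: alternative
-- what changed: B derives digits and every carry by pure arithmetic with a closed-form, column-local carry ((la % 10^i + lb % 10^i) // 10^i) instead of A's string formatting plus sequential carry accumulator.
import Mathlib
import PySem

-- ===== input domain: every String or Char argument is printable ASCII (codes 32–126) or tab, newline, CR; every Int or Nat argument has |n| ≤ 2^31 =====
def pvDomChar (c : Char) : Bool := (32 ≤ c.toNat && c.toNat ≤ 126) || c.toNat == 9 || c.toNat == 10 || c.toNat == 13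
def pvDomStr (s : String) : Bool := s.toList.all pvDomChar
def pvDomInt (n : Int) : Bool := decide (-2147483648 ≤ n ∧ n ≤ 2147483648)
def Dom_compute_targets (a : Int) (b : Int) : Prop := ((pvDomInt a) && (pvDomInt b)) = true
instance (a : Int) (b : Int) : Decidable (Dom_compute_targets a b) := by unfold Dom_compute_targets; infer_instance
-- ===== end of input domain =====

-- B replaces A's sequential carry accumulator by a closed-form, column-local carry
-- ((la % 10^i + lb % 10^i) // 10^i) and pure arithmetic digit extraction instead of
-- string formatting; objective: alternative decomposition. Equality of RETURN values only.

-- ===== PORT A =====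

-- int(ch): exact for digit characters '0'..'9'; on '-' Python raises ValueError
-- (only reachable for negative inputs, which Pre_ excludes).
def pvDigitVal (c : Char) : Int := (c.toNat : Int) - 48

-- f"{n:010d}" is str(n) zero-padded to width 10 (sign kept in front) = str(n).zfill(10);
-- ported on List Char via PySem.Chars.  [int(ch) for ch in reversed(...)] follows.
def pvDigitsA (n : Int) : List Int :=
  ((PySem.Chars.zfill (PySem.Int.toChars n) 10).reverse).map pvDigitVal

def pvStepA (a_digits b_digits : List Int)
    (st : List Int × List Int × List Int × List Int × Int) (i : Int) :
    List Int × List Int × List Int × List Int × Int :=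
  let sm := st.1
  let pc := st.2.1
  let ci := st.2.2.1
  let yp := st.2.2.2.1
  let carry_in := st.2.2.2.2
  -- a_digits[i]: the index is always in range here (0 ≤ i < 10, list length 10),
  -- so pyGetD is exact for the Python indexing
  let d1 := if i < 10 then PySem.List.pyGetD a_digits i 0 else 0
  let d2 := if i < 10 then PySem.List.pyGetD b_digits i 0 else 0
  let pair_sum := d1 + d2
  let sum_mod := PySem.Int.mod pair_sum 10
  let pair_carry := PySem.Int.floordiv pair_sum 10
  let total := pair_sum + carry_in
  let out_digit := PySem.Int.mod total 10
  let carry_out := PySem.Int.floordiv total 10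
  (sm ++ [sum_mod], pc ++ [pair_carry], ci ++ [carry_in],
   yp ++ [10 * carry_out + out_digit], carry_out)

def compute_targets (a : Int) (b : Int) : List Int × List Int × List Int × List Int :=
  let a_digits := pvDigitsA a
  let b_digits := pvDigitsA b
  let st := (PySem.List.pyRange 0 11).foldl (pvStepA a_digits b_digits)
    (([], [], [], [], 0) : List Int × List Int × List Int × List Int × Int)
  (st.1, st.2.1, st.2.2.1, st.2.2.2.1)

-- ===== PORT B =====

-- digit(x, i) from Source B (loop indices 0..10 are nonnegative, carried as Nat)
def pvDigitB (x : Int) (i : Nat) : Int :=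
  if i < 10 then PySem.Int.mod (PySem.Int.floordiv x ((10 : Int) ^ i)) 10 else 0

-- carry(i) from Source B
def pvCarryB (la lb : Int) (i : Nat) : Int :=
  PySem.Int.floordiv (PySem.Int.mod la ((10 : Int) ^ i) + PySem.Int.mod lb ((10 : Int) ^ i)) ((10 : Int) ^ i)

def compute_targets_alt (a : Int) (b : Int) : List Int × List Int × List Int × List Int :=
  let la := PySem.Int.mod a ((10 : Int) ^ 10)
  let lb := PySem.Int.mod b ((10 : Int) ^ 10)
  let sum_mod_cols := (List.range 11).map (fun i => PySem.Int.mod (pvDigitB la i + pvDigitB lb i) 10)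
  let pair_carry_cols := (List.range 11).map (fun i => PySem.Int.floordiv (pvDigitB la i + pvDigitB lb i) 10)
  let carry_in_cols := (List.range 11).map (fun i => pvCarryB la lb i)
  let y_pairs := (List.range 11).map
    (fun i => 10 * pvCarryB la lb (i + 1) + PySem.Int.mod (pvDigitB la i + pvDigitB lb i + pvCarryB la lb i) 10)
  (sum_mod_cols, pair_carry_cols, carry_in_cols, y_pairs)

-- ===== PRECONDITION & SPEC =====

-- A raises ValueError on any negative argument (int('-') on the sign character of
-- f"{n:010d}"); Pre_ excludes exactly those inputs.
def Pre_compute_targets (a : Int) (b : Int) : Prop := 0 ≤ a ∧ 0 ≤ b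
instance (a : Int) (b : Int) : Decidable (Pre_compute_targets a b) := by unfold Pre_compute_targets; infer_instance

def pvWitness_compute_targets : Int × Int := (1234567, 7654321)

def Spec_compute_targets (a : Int) (b : Int) (out : List Int × List Int × List Int × List Int) : Prop := out = compute_targets_alt a b
instance (a : Int) (b : Int) (out : List Int × List Int × List Int × List Int) : Decidable (Spec_compute_targets a b out) := by unfold Spec_compute_targets; infer_instance

-- ===== CLAIM (what is proved, stated in full; the proofs are below) =====
def Claim_equal_compute_targets : Prop := ∀ (a : Int) (b : Int), Dom_compute_targets a b → Pre_compute_targets a b → Spec_compute_targets a b (compute_targets a b)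
-- ===== LEMMAS AND PROOFS =====

theorem pvDigitVal_digitChar (d : Nat) (hd : d < 10) : pvDigitVal (Nat.digitChar d) = (d : Int) := by
  interval_cases d <;> rfl

theorem pv_isDigit_ne_sign (c : Char) (h : c.isDigit) : ¬(c = '+' ∨ c = '-') := by
  rintro (rfl | rfl) <;> simp [Char.isDigit] at h

-- zfill on a nonempty all-digit string is a left pad of zeros
theorem pv_zfill_digits (cs : List Char) (w : Nat) (hne : cs ≠ [])
    (hd : ∀ c ∈ cs, c.isDigit) :
    PySem.Chars.zfill cs (w : Int) = List.replicate (w - cs.length) '0' ++ cs := by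
  cases cs with
  | nil => exact absurd rfl hne
  | cons c rest =>
    have hc : ¬(c = '+' ∨ c = '-') := pv_isDigit_ne_sign c (hd c (by simp))
    simp only [PySem.Chars.zfill]
    split
    · next h =>
      have : w ≤ (c :: rest).length := by exact_mod_cast h
      rw [Nat.sub_eq_zero_of_le this]
      simp
    · next h =>
      simp [Int.toNat_natCast]

-- the reversed digit-char list of n, valued, is n's little-endian digit list
theorem pv_toDigits_rev (n : Nat) :
    (Nat.toDigits 10 n).reverse.map pvDigitVal
      = (List.range (Nat.toDigits 10 n).length).map (fun i => ((n / 10 ^ i % 10 : Nat) : Int)) := by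
  induction n using Nat.strong_induction_on with
  | _ n ih =>
    by_cases h : n < 10
    · rw [Nat.toDigits_of_lt_base h]
      simp [pvDigitVal_digitChar n h]
      omega
    · rw [Nat.toDigits_of_base_le (by norm_num) (le_of_not_gt h)]
      have hlt : n / 10 < n := Nat.div_lt_self (by omega) (by norm_num)
      have IH := ih (n / 10) hlt
      simp only [List.reverse_append, List.reverse_cons, List.reverse_nil, List.nil_append,
        List.cons_append, List.map_cons, List.length_append, List.length_cons, List.length_nil]
      rw [pvDigitVal_digitChar (n % 10) (Nat.mod_lt n (by norm_num)), IH]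
      have hr : List.range ((Nat.toDigits 10 (n / 10)).length + 1)
          = 0 :: (List.range (Nat.toDigits 10 (n / 10)).length).map Nat.succ :=
        List.range_succ_eq_map
      rw [show (Nat.toDigits 10 (n/10)).length + 0 + 1 = (Nat.toDigits 10 (n/10)).length + 1 by omega, hr]
      simp only [List.map_cons, List.map_map]
      congr 1
      · norm_num
      · apply List.map_congr_left
        intro i _
        simp only [Function.comp_apply, Nat.succ_eq_add_one]
        congr 1
        rw [Nat.div_div_eq_div_mul, pow_succ, mul_comm]

-- each character str(n) produces is a digit
theorem pv_toDigits_isDigit (n : Nat) : ∀ c ∈ Nat.toDigits 10 n, c.isDigit := by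
  intro c hc
  exact Nat.isDigit_of_mem_toDigits (by norm_num) (by norm_num) hc

-- the A-side digit list of a small nonnegative n, in closed form
theorem pvDigitsA_eq (n : Nat) (h : n < 10 ^ 10) :
    pvDigitsA (n : Int) = (List.range 10).map (fun i => ((n / 10 ^ i % 10 : Nat) : Int)) := by
  have hne : Nat.toDigits 10 n ≠ [] := by
    have := @Nat.length_toDigits_pos 10 n
    intro hnil; rw [hnil] at this; simp at this
  have hlen : (Nat.toDigits 10 n).length ≤ 10 :=
    (Nat.length_toDigits_le_iff (by norm_num) (by norm_num)).2 h
  have hsmall : n < 10 ^ (Nat.toDigits 10 n).length :=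
    (Nat.length_toDigits_le_iff (by norm_num) (@Nat.length_toDigits_pos 10 n)).1 le_rfl
  unfold pvDigitsA
  have htc : PySem.Int.toChars (n : Int) = Nat.toDigits 10 n := by
    simp [PySem.Int.toChars]
  rw [htc, show (10 : Int) = ((10 : Nat) : Int) by norm_num,
    pv_zfill_digits _ _ hne (pv_toDigits_isDigit n)]
  rw [List.reverse_append, List.reverse_replicate, List.map_append, pv_toDigits_rev n]
  have hpad : (List.replicate (10 - (Nat.toDigits 10 n).length) '0').map pvDigitVal
      = List.replicate (10 - (Nat.toDigits 10 n).length) (0 : Int) := by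
    rw [List.map_replicate, show pvDigitVal '0' = (0 : Int) from rfl]
  rw [hpad]
  set L := (Nat.toDigits 10 n).length with hL
  have hsplit : List.range 10 = List.range L ++ (List.range (10 - L)).map (fun j => L + j) := by
    conv_lhs => rw [show (10 : Nat) = L + (10 - L) from by omega]
    exact List.range_add
  rw [hsplit, List.map_append]
  congr 1
  symm
  rw [List.map_map, List.eq_replicate_iff]
  refine ⟨by simp, ?_⟩
  intro x hx
  simp only [List.mem_map, List.mem_range] at hx
  obtain ⟨j, _, rfl⟩ := hx
  have hz : n / 10 ^ (L + j) = 0 := by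
    apply Nat.div_eq_of_lt
    calc n < 10 ^ L := hsmall
    _ ≤ 10 ^ (L + j) := Nat.pow_le_pow_right (by norm_num) (by omega)
  show ((n / 10 ^ (L + j) % 10 : Nat) : Int) = 0
  rw [hz]
  rfl

-- proof-only abbreviations: B-side digit and carry at Nat arguments
def pvDm (m : Nat) (i : Nat) : Int := pvDigitB (m : Int) i
def pvCm (m p : Nat) (i : Nat) : Int := pvCarryB (m : Int) (p : Int) i

-- the state of A's loop after k iterations, in B's closed-form vocabulary
def pvCanon (m p : Nat) (k : Nat) : List Int × List Int × List Int × List Int × Int :=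
  ((List.range k).map (fun i => PySem.Int.mod (pvDm m i + pvDm p i) 10),
   (List.range k).map (fun i => PySem.Int.floordiv (pvDm m i + pvDm p i) 10),
   (List.range k).map (fun i => pvCm m p i),
   (List.range k).map
     (fun i => 10 * pvCm m p (i + 1) + PySem.Int.mod (pvDm m i + pvDm p i + pvCm m p i) 10),
   pvCm m p k)

theorem pv_ten_cast : (10 : Int) = ((10 : Nat) : Int) := rfl

theorem pv_pow_cast (i : Nat) : ((10 : Int) ^ i) = ((10 ^ i : Nat) : Int) := by push_cast; ring

theorem pvCm_zero (m p : Nat) : pvCm m p 0 = 0 := by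
  simp only [pvCm, pvCarryB, pow_zero]
  rw [PySem.Int.mod_eq_emod_of_pos (by norm_num), PySem.Int.mod_eq_emod_of_pos (by norm_num),
    PySem.Int.floordiv_eq_ediv_of_pos (by norm_num)]
  simp

theorem pvDm_eq (m i : Nat) (hi : i < 10) : pvDm m i = ((m / 10 ^ i % 10 : Nat) : Int) := by
  rw [pvDm, pvDigitB, if_pos hi, pv_pow_cast, PySem.Int.floordiv_natCast, pv_ten_cast,
    PySem.Int.mod_natCast]

theorem pvCm_eq (m p i : Nat) : pvCm m p i = (((m % 10 ^ i + p % 10 ^ i) / 10 ^ i : Nat) : Int) := by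
  rw [pvCm, pvCarryB, pv_pow_cast, PySem.Int.mod_natCast, PySem.Int.mod_natCast, ← Nat.cast_add,
    PySem.Int.floordiv_natCast]

-- the sequential carry recurrence satisfied by the closed-form carry
theorem pv_carry_step (m p i : Nat) :
    (m / 10 ^ i % 10 + p / 10 ^ i % 10 + (m % 10 ^ i + p % 10 ^ i) / 10 ^ i) / 10
      = (m % 10 ^ (i + 1) + p % 10 ^ (i + 1)) / 10 ^ (i + 1) := by
  have hP : 0 < 10 ^ i := Nat.pow_pos (by norm_num)
  rw [Nat.mod_pow_succ (x := m), Nat.mod_pow_succ (x := p), pow_succ, ← Nat.div_div_eq_div_mul]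
  congr 1
  rw [show m % 10 ^ i + 10 ^ i * (m / 10 ^ i % 10) + (p % 10 ^ i + 10 ^ i * (p / 10 ^ i % 10))
      = 10 ^ i * (m / 10 ^ i % 10 + p / 10 ^ i % 10) + (m % 10 ^ i + p % 10 ^ i) by ring,
    Nat.mul_add_div hP]

theorem pv_step_carry_int (m p i : Nat) (hm : m < 10 ^ 10) (hp : p < 10 ^ 10) (hi : i ≤ 10) :
    PySem.Int.floordiv (pvDm m i + pvDm p i + pvCm m p i) 10 = pvCm m p (i + 1) := by
  by_cases h : i < 10
  · rw [pvDm_eq m i h, pvDm_eq p i h, pvCm_eq, pvCm_eq, ← Nat.cast_add, ← Nat.cast_add,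
      pv_ten_cast, PySem.Int.floordiv_natCast]
    exact_mod_cast pv_carry_step m p i
  · have h10 : i = 10 := by omega
    subst h10
    have hzm : m / 10 ^ 10 % 10 = 0 := by rw [Nat.div_eq_of_lt hm]
    have hzp : p / 10 ^ 10 % 10 = 0 := by rw [Nat.div_eq_of_lt hp]
    have hDm : pvDm m 10 = ((m / 10 ^ 10 % 10 : Nat) : Int) := by
      rw [pvDm, pvDigitB, if_neg (by omega), hzm]; simp
    have hDp : pvDm p 10 = ((p / 10 ^ 10 % 10 : Nat) : Int) := by
      rw [pvDm, pvDigitB, if_neg (by omega), hzp]; simp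
    rw [hDm, hDp, pvCm_eq, pvCm_eq, ← Nat.cast_add, ← Nat.cast_add, pv_ten_cast,
      PySem.Int.floordiv_natCast]
    exact_mod_cast pv_carry_step m p 10

-- loop invariant: after k of the 11 iterations A's state is pvCanon m p k
theorem pv_inv (m p : Nat) (hm : m < 10 ^ 10) (hp : p < 10 ^ 10) :
    ∀ k : Nat, k ≤ 11 →
      (PySem.List.pyRange 0 (k : Int)).foldl
        (pvStepA ((List.range 10).map (fun i => ((m / 10 ^ i % 10 : Nat) : Int)))
                 ((List.range 10).map (fun i => ((p / 10 ^ i % 10 : Nat) : Int))))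
        (([], [], [], [], 0) : List Int × List Int × List Int × List Int × Int)
      = pvCanon m p k := by
  intro k
  induction k with
  | zero =>
    intro _
    rw [show (PySem.List.pyRange 0 ((0 : Nat) : Int)) = [] from rfl]
    simp [pvCanon, pvCm_zero]
  | succ k ih =>
    intro hk
    have hk' : k ≤ 11 := by omega
    have hcast : ((k + 1 : Nat) : Int) = (k : Int) + 1 := by push_cast; ring
    rw [hcast, PySem.List.pyRange_one_succ_right (by positivity), List.foldl_append, ih hk']
    show pvStepA _ _ (pvCanon m p k) (k : Int) = pvCanon m p (k + 1)
    have hd1 : (if (k : Int) < 10 then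
        PySem.List.pyGetD ((List.range 10).map (fun i => ((m / 10 ^ i % 10 : Nat) : Int))) (k : Int) 0
        else 0) = pvDm m k := by
      by_cases h : k < 10
      · rw [if_pos (by exact_mod_cast h), PySem.List.pyGetD_natCast,
          PySem.List.getD_map_range _ _ _ _ h, pvDm_eq m k h]
      · rw [if_neg (by exact_mod_cast h), pvDm, pvDigitB, if_neg h]
    have hd2 : (if (k : Int) < 10 then
        PySem.List.pyGetD ((List.range 10).map (fun i => ((p / 10 ^ i % 10 : Nat) : Int))) (k : Int) 0
        else 0) = pvDm p k := by
      by_cases h : k < 10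
      · rw [if_pos (by exact_mod_cast h), PySem.List.pyGetD_natCast,
          PySem.List.getD_map_range _ _ _ _ h, pvDm_eq p k h]
      · rw [if_neg (by exact_mod_cast h), pvDm, pvDigitB, if_neg h]
    have hstep := pv_step_carry_int m p k hm hp (by omega)
    simp only [pvStepA, pvCanon, hd1, hd2]
    rw [List.range_succ]
    simp only [List.map_append, List.map_cons, List.map_nil, Prod.mk.injEq]
    refine ⟨trivial, trivial, trivial, ?_, ?_⟩
    · rw [hstep]
    · exact hstep

-- ===== VERDICT (by name: the statements are the Claim_ definitions above) =====
theorem compute_targets_spec : Claim_equal_compute_targets := by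
  unfold Claim_equal_compute_targets
  intro a b hdom hpre
  unfold Spec_compute_targets
  obtain ⟨ha, hb⟩ := hpre
  lift a to ℕ using ha with m
  lift b to ℕ using hb with p
  have hdm : (m : Int) ≤ 2147483648 := by
    unfold Dom_compute_targets pvDomInt at hdom
    simp only [Bool.and_eq_true, decide_eq_true_eq] at hdom
    exact hdom.1.2
  have hdp : (p : Int) ≤ 2147483648 := by
    unfold Dom_compute_targets pvDomInt at hdom
    simp only [Bool.and_eq_true, decide_eq_true_eq] at hdom
    exact hdom.2.2
  have hm : m < 10 ^ 10 := by
    have : m ≤ 2147483648 := by exact_mod_cast hdm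
    omega
  have hp : p < 10 ^ 10 := by
    have : p ≤ 2147483648 := by exact_mod_cast hdp
    omega
  have hla : PySem.Int.mod (m : Int) ((10 : Int) ^ 10) = (m : Int) := by
    rw [pv_pow_cast, PySem.Int.mod_natCast, Nat.mod_eq_of_lt hm]
  have hlb : PySem.Int.mod (p : Int) ((10 : Int) ^ 10) = (p : Int) := by
    rw [pv_pow_cast, PySem.Int.mod_natCast, Nat.mod_eq_of_lt hp]
  simp only [compute_targets, compute_targets_alt, hla, hlb,
    pvDigitsA_eq m hm, pvDigitsA_eq p hp]
  have hI := pv_inv m p hm hp 11 le_rfl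
  simp only [Nat.cast_ofNat] at hI
  rw [hI]
  simp only [pvCanon, pvDm, pvCm]
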